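-- pv_equiv track=rewrite | github.com/LucasAcacio/GraphExercise | res.py | getDirectedGraphMatrix
-- ===== SOURCE A (Python) =====
-- def getDirectedGraphMatrix(vertexList, edgeList):
--     matrix = []
--
--     for x in vertexList:
--       aux = []
--       for y in vertexList:
--         flag = 0
--         for t in edgeList:
--           if (x == t[0] and y == t[1]):
--             flag = 1
--         aux.append(flag)
--
--       matrix.append(aux)
--     return matrix
-- ===== SOURCE B (Python) =====
-- def getDirectedGraphMatrix(vertexList, edgeList):
--     vset = set(vertexList)
--     pairs = set()
--     for t in edgeList:
--         if len(t) >= 2 and t[0] in vset and t[1] in vset: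
--             pairs.add((t[0], t[1]))
--     return [[1 if (x, y) in pairs else 0 for y in vertexList] for x in vertexList]
-- ===== Notes on version B (the rewrite author's own statement) =====
-- stated objective: faster
-- what changed: Replaces the triple nested scan (for every cell of the V x V matrix, scan the whole edge list) by a single pass over the edges that builds a set of (source, destination) pairs (skipping malformed or unknown-endpoint edges), followed by an O(1) set lookup per matrix cell.
import Mathlib
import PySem

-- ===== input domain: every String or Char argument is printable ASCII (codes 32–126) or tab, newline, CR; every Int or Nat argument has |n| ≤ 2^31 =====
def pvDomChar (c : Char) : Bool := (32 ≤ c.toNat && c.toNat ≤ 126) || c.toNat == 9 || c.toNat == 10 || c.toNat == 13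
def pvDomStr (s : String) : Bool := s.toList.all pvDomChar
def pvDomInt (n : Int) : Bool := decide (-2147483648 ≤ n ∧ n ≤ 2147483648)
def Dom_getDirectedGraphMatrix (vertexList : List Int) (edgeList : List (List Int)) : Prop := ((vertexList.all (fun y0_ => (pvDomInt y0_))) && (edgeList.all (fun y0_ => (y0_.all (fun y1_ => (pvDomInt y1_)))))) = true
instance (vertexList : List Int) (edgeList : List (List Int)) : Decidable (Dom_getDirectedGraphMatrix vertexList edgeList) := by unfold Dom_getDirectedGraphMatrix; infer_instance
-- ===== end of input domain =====

-- B replaces A's triple nested scan (edge scan per matrix cell) by one pass over the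
-- edges building a set of (source, destination) pairs plus a set lookup per cell (objective: faster).

-- ===== PORT A =====
-- t[0] / t[1] are ported with pyGetD (total form of Python subscripting): Pre_ below
-- excludes exactly the inputs where Python A's subscripts would raise IndexError,
-- and the nested ifs mirror the `and` short-circuit of A.
def getDirectedGraphMatrix (vertexList : List Int) (edgeList : List (List Int)) : List (List Int) :=
  vertexList.foldl (fun matrix x =>
    matrix ++ [vertexList.foldl (fun aux y =>
      aux ++ [edgeList.foldl (fun flag t =>
        if x = PySem.List.pyGetD t 0 0 then
          if y = PySem.List.pyGetD t 1 0 then 1 else flag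
        else flag) 0]) []]) []

-- ===== PORT B =====
-- inside the `2 ≤ t.length` guard, pyGetD t 0 0 / pyGetD t 1 0 are exactly Python's t[0] / t[1]
def getDirectedGraphMatrix_alt (vertexList : List Int) (edgeList : List (List Int)) : List (List Int) :=
  let vset : PySem.Set Int := PySem.Set.ofList vertexList
  let pairs : PySem.Set (Int × Int) := edgeList.foldl (fun s t =>
    if 2 ≤ t.length then
      if vset.contains (PySem.List.pyGetD t 0 0) then
        if vset.contains (PySem.List.pyGetD t 1 0) then
          s.add (PySem.List.pyGetD t 0 0, PySem.List.pyGetD t 1 0)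
        else s
      else s
    else s) PySem.Set.empty
  vertexList.map (fun x => vertexList.map (fun y => if pairs.contains (x, y) then 1 else 0))

-- ===== PRECONDITION & SPEC =====
-- Pre_ excludes exactly the inputs on which Python A raises IndexError: a nonempty
-- vertexList together with some edge that is empty, or of length 1 with its entry a
-- listed vertex (so t[0] or t[1] is evaluated out of range). A returns on all other inputs.
def Pre_getDirectedGraphMatrix (vertexList : List Int) (edgeList : List (List Int)) : Prop :=
  vertexList = [] ∨ ∀ t ∈ edgeList, t ≠ [] ∧ (t.headI ∈ vertexList → 2 ≤ t.length)
instance (vertexList : List Int) (edgeList : List (List Int)) : Decidable (Pre_getDirectedGraphMatrix vertexList edgeList) := by unfold Pre_getDirectedGraphMatrix; infer_instance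

def pvWitness_getDirectedGraphMatrix : List Int × List (List Int) := ([1, 2, 3], [[1, 2], [3, 1], [4, 2]])

def Spec_getDirectedGraphMatrix (vertexList : List Int) (edgeList : List (List Int)) (out : List (List Int)) : Prop := out = getDirectedGraphMatrix_alt vertexList edgeList
instance (vertexList : List Int) (edgeList : List (List Int)) (out : List (List Int)) : Decidable (Spec_getDirectedGraphMatrix vertexList edgeList out) := by unfold Spec_getDirectedGraphMatrix; infer_instance

-- ===== CLAIM (what is proved, stated in full; the proofs are below) =====
def Claim_equal_getDirectedGraphMatrix : Prop := ∀ (vertexList : List Int) (edgeList : List (List Int)), Dom_getDirectedGraphMatrix vertexList edgeList → Pre_getDirectedGraphMatrix vertexList edgeList → Spec_getDirectedGraphMatrix vertexList edgeList (getDirectedGraphMatrix vertexList edgeList)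

-- ===== LEMMAS AND PROOFS =====

-- A's flag loop computes "does some edge match (x, y)?"
theorem pv_flag_loop (x y : Int) (l : List (List Int)) (f : Int) :
    l.foldl (fun flag t =>
        if x = PySem.List.pyGetD t 0 0 then
          if y = PySem.List.pyGetD t 1 0 then 1 else flag
        else flag) f
      = if (∃ t ∈ l, x = PySem.List.pyGetD t 0 0 ∧ y = PySem.List.pyGetD t 1 0) then 1 else f := by
  induction l generalizing f with
  | nil => simp
  | cons t l ih =>
    simp only [List.foldl_cons, ih, List.mem_cons]
    by_cases h0 : x = PySem.List.pyGetD t 0 0 <;> by_cases h1 : y = PySem.List.pyGetD t 1 0 <;>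
      split_ifs with h h' <;> simp_all <;> tauto

-- membership in B's pair set
theorem pv_pairs_mem (vset : PySem.Set Int) (l : List (List Int)) (s : PySem.Set (Int × Int))
    (p : Int × Int) :
    (p ∈ l.foldl (fun s t =>
        if 2 ≤ t.length then
          if vset.contains (PySem.List.pyGetD t 0 0) then
            if vset.contains (PySem.List.pyGetD t 1 0) then
              s.add (PySem.List.pyGetD t 0 0, PySem.List.pyGetD t 1 0)
            else s
          else s
        else s) s)
      ↔ p ∈ s ∨ (∃ t ∈ l, p = (PySem.List.pyGetD t 0 0, PySem.List.pyGetD t 1 0)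
          ∧ 2 ≤ t.length ∧ PySem.List.pyGetD t 0 0 ∈ vset ∧ PySem.List.pyGetD t 1 0 ∈ vset) := by
  induction l generalizing s with
  | nil => simp
  | cons t l ih =>
    simp only [List.foldl_cons, List.mem_cons]
    by_cases hl : 2 ≤ t.length <;>
      by_cases h0 : vset.contains (PySem.List.pyGetD t 0 0) <;>
      by_cases h1 : vset.contains (PySem.List.pyGetD t 1 0) <;>
      simp only [hl, h0, h1, if_true, if_false, ih, PySem.Set.mem_add] <;>
      constructor <;> rintro (h | h) <;> simp_all <;>
        first
          | tauto
          | ((rcases h with ⟨-, h2⟩ | h) <;> first | omega | tauto)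

-- A's append-accumulator loops are maps
theorem pv_foldl_append_map {α β : Type} (f : α → β) (l : List α) (init : List β) :
    l.foldl (fun acc a => acc ++ [f a]) init = init ++ l.map f := by
  induction l generalizing init with
  | nil => simp
  | cons a l ih => simp [ih]

-- ===== VERDICT (by name: the statement is the Claim_ definition above) =====
theorem getDirectedGraphMatrix_spec : Claim_equal_getDirectedGraphMatrix := by
  intro V E _ hpre
  unfold Spec_getDirectedGraphMatrix getDirectedGraphMatrix getDirectedGraphMatrix_alt
  simp only [pv_foldl_append_map, List.nil_append, pv_flag_loop]
  apply List.map_congr_left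
  intro x hx
  apply List.map_congr_left
  intro y hy
  have hV : V ≠ [] := by rintro rfl; simp at hx
  have hE : ∀ t ∈ E, t ≠ [] ∧ (t.headI ∈ V → 2 ≤ t.length) := hpre.resolve_left hV
  congr 1
  simp only [eq_iff_iff]
  rw [show (PySem.Set.contains _ (x, y) = true) ↔ ((x, y) ∈
    E.foldl _ PySem.Set.empty) from PySem.Set.contains_iff _ _, pv_pairs_mem]
  constructor
  · rintro ⟨t, ht, h0, h1⟩
    obtain ⟨hne, hlen⟩ := hE t ht
    have hhead : PySem.List.pyGetD t 0 0 = t.headI := by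
      cases t with
      | nil => exact absurd rfl hne
      | cons a l => simp [PySem.List.pyGetD, PySem.List.pyGet?, PySem.List.pyIdx?]
    refine Or.inr ⟨t, ht, by simp [← h0, ← h1], ?_, ?_, ?_⟩
    · exact hlen (by rw [← hhead, ← h0]; exact hx)
    · simp [PySem.Set.mem_ofList, ← h0, hx]
    · simp [PySem.Set.mem_ofList, ← h1, hy]
  · rintro (h | ⟨t, ht, hp, _, _, _⟩)
    · simp [PySem.Set.empty] at h
    · exact ⟨t, ht, by simpa using congrArg Prod.fst hp, by simpa using congrArg Prod.snd hp⟩
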